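-- pv_equiv track=rewrite | github.com/s-nlp/touche | models1.py | get_objects_predicates
-- ===== SOURCE A (Python) =====
-- def get_objects_predicates(list_words, list_tags):
--     obj_list = []
--     pred_list = []
--     asp_list = []
--     for ind, elem in enumerate(list_tags):
--         if elem == 'B-OBJ':
--             obj_list.append(list_words[ind])
--         if elem == 'B-PREDFULL':
--             pred_list.append(list_words[ind])
--         if elem == 'B-ASP':
--             asp_list.append(list_words[ind])
--     return obj_list, pred_list, asp_list
-- ===== SOURCE B (Python) =====
-- def get_objects_predicates(list_words, list_tags):
--     def pick(tag):
--         return [list_words[i] for i, t in enumerate(list_tags) if t == tag]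
--     return pick('B-OBJ'), pick('B-PREDFULL'), pick('B-ASP')
-- ===== Notes on version B (the rewrite author's own statement) =====
-- stated objective: idiomatic
-- what changed: Replaces the single accumulating loop over enumerate with three independent filtered comprehensions, one per tag, returned as a tuple.
import Mathlib
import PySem

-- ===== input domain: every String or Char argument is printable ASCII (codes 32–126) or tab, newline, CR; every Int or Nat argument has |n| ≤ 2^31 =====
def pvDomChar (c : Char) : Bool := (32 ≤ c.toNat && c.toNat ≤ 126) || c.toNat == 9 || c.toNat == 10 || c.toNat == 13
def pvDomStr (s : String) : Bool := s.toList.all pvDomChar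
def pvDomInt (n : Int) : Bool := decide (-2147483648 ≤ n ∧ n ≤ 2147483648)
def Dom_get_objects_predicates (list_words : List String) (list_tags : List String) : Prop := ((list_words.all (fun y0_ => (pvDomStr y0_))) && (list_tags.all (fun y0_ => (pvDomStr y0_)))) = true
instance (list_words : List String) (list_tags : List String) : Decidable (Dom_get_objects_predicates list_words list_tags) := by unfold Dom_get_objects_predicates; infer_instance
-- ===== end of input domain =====

-- B replaces A's single accumulating loop by three independent filtered passes (one per tag): idiomatic, same cost.

-- ===== PORT A =====
-- One pass over enumerate(list_tags), appending list_words[ind] to the matching accumulator.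
-- pyGet? = none is exactly where Python raises IndexError (excluded by Pre_); the fold skips there.
def get_objects_predicates (list_words : List String) (list_tags : List String) : List String × List String × List String :=
  let r := (PySem.List.enumerate list_tags 0).foldl
    (fun acc p =>
      let w := (PySem.List.pyGet? list_words p.1).toList
      let o := if p.2 = "B-OBJ" then acc.1 ++ w else acc.1
      let pr := if p.2 = "B-PREDFULL" then acc.2.1 ++ w else acc.2.1
      let a := if p.2 = "B-ASP" then acc.2.2 ++ w else acc.2.2
      (o, pr, a))
    ([], [], [])
  r

-- ===== PORT B =====
-- [list_words[i] for i, t in enumerate(list_tags) if t == tag]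
def pvPick (list_words : List String) (list_tags : List String) (tag : String) : List String :=
  (PySem.List.enumerate list_tags 0).filterMap
    (fun p => if p.2 = tag then PySem.List.pyGet? list_words p.1 else none)

def get_objects_predicates_alt (list_words : List String) (list_tags : List String) : List String × List String × List String :=
  (pvPick list_words list_tags "B-OBJ",
   pvPick list_words list_tags "B-PREDFULL",
   pvPick list_words list_tags "B-ASP")

-- ===== PRECONDITION & SPEC =====
-- Pre_ excludes exactly the inputs where Python A raises IndexError: a tag among the three
-- marker tags occurring at an index ≥ len(list_words).
def Pre_get_objects_predicates (list_words : List String) (list_tags : List String) : Prop :=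
  ∀ i : Nat, i < list_tags.length →
    (list_tags[i]! = "B-OBJ" ∨ list_tags[i]! = "B-PREDFULL" ∨ list_tags[i]! = "B-ASP") →
    i < list_words.length
instance (list_words : List String) (list_tags : List String) : Decidable (Pre_get_objects_predicates list_words list_tags) := by unfold Pre_get_objects_predicates; infer_instance

def pvWitness_get_objects_predicates : List String × List String :=
  (["a", "b", "c"], ["B-OBJ", "O", "B-ASP"])

def Spec_get_objects_predicates (list_words : List String) (list_tags : List String) (out : List String × List String × List String) : Prop := out = get_objects_predicates_alt list_words list_tags
instance (list_words : List String) (list_tags : List String) (out : List String × List String × List String) : Decidable (Spec_get_objects_predicates list_words list_tags out) := by unfold Spec_get_objects_predicates; infer_instance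

-- ===== CLAIM (what is proved, stated in full; the proofs are below) =====
def Claim_equal_get_objects_predicates : Prop := ∀ (list_words : List String) (list_tags : List String), Dom_get_objects_predicates list_words list_tags → Pre_get_objects_predicates list_words list_tags → Spec_get_objects_predicates list_words list_tags (get_objects_predicates list_words list_tags)

-- ===== LEMMAS AND PROOFS =====

-- Generic loop invariant: folding A's step over any list of (index, tag) pairs appends,
-- componentwise, exactly B's three filtered selections over that list.
theorem pv_fold_eq_picks (words : List String) (l : List (Int × String))
    (o pr a : List String) :
    l.foldl
      (fun acc p =>
        let w := (PySem.List.pyGet? words p.1).toList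
        let o := if p.2 = "B-OBJ" then acc.1 ++ w else acc.1
        let pr := if p.2 = "B-PREDFULL" then acc.2.1 ++ w else acc.2.1
        let a := if p.2 = "B-ASP" then acc.2.2 ++ w else acc.2.2
        (o, pr, a))
      (o, pr, a)
    = (o ++ l.filterMap (fun p => if p.2 = "B-OBJ" then PySem.List.pyGet? words p.1 else none),
       pr ++ l.filterMap (fun p => if p.2 = "B-PREDFULL" then PySem.List.pyGet? words p.1 else none),
       a ++ l.filterMap (fun p => if p.2 = "B-ASP" then PySem.List.pyGet? words p.1 else none)) := by
  induction l generalizing o pr a with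
  | nil => simp
  | cons hd tl ih =>
    obtain ⟨i, t⟩ := hd
    simp only [List.foldl_cons, List.filterMap_cons]
    rw [ih]
    cases hw : PySem.List.pyGet? words i <;>
      simp only [Option.toList] <;>
      split_ifs <;> simp

-- ===== VERDICT (by name: the statement is the Claim_ definition above) =====
theorem get_objects_predicates_spec : Claim_equal_get_objects_predicates := by
  intro words tags _ _
  unfold Spec_get_objects_predicates get_objects_predicates get_objects_predicates_alt pvPick
  simp only [pv_fold_eq_picks, List.nil_append]
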